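-- pv_equiv track=rewrite | github.com/paratpanu18/Object-Oriented-Data-Structure | Excercise/ch_06/4.py | find
-- ===== SOURCE A (Python) =====
-- def diff(sour: int, bitter: int) -> int:
--     return abs(sour - bitter)
--
-- def find(length: int, sour: int, bitter: int, sour_l: list, bitter_l: list, length_inp: int, best: int) -> int:
--     if length == length_inp:
--         if bitter > 0:
--             return min(best, diff(sour, bitter))
--         return best
--     else:
--         # Including the current ingredient
--         best_with = find(length + 1, sour * sour_l[length], bitter + bitter_l[length], sour_l, bitter_l, length_inp, best)
--
--         # Excluding the current ingredient
--         best_without = find(length + 1, sour, bitter, sour_l, bitter_l, length_inp, best)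
--         return min(best_with, best_without)
-- ===== SOURCE B (Python) =====
-- def find(length, sour, bitter, sour_l, bitter_l, length_inp, best):
--     # Iterative bitmask enumeration of the include/exclude choices for the
--     # indices length..length_inp-1, instead of A's binary recursion.
--     for mask in range(2 ** (length_inp - length)):
--         prod, total = sour, bitter
--         for i in range(length, length_inp):
--             if (mask >> (i - length)) & 1:
--                 prod *= sour_l[i]
--                 total += bitter_l[i]
--         if total > 0:
--             best = min(best, abs(prod - total))
--     return best
-- ===== Notes on version B (the rewrite author's own statement) =====
-- stated objective: alternative
-- what changed: Replaces the binary include/exclude recursion by an iterative bitmask loop that enumerates the subsets of indices length..length_inp-1 and keeps a running best; no recursion and no threading of best through branch pairs.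
import Mathlib
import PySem

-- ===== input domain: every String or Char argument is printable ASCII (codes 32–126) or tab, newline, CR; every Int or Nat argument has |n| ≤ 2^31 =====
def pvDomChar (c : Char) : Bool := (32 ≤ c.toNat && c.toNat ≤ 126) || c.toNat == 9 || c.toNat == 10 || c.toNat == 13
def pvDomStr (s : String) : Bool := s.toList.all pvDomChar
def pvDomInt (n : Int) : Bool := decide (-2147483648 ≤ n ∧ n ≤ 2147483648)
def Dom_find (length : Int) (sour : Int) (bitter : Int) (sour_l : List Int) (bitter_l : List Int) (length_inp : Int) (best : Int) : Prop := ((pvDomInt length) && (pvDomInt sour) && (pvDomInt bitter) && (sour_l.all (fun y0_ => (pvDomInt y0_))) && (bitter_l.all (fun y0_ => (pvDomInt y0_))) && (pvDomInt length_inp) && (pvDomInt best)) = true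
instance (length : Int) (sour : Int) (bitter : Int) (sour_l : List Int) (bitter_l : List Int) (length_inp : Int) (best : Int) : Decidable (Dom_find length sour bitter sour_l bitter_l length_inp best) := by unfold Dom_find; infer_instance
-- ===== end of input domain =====

-- B replaces the include/exclude recursion by an iterative bitmask enumeration of the
-- subsets of indices length..length_inp-1 (alternative decomposition; same exponential cost).

-- ===== PORT A =====
def pvDiff (sour : Int) (bitter : Int) : Int := |sour - bitter|

-- Fuel = length_inp - length (the recursion depth Python actually uses under Pre_find).
-- Indexing uses pyGet? (Python semantics, negative wrap); the .getD 0 default is never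
-- reached under Pre_find (Python raises IndexError exactly there, excluded by Pre_find).
def findFuel (sour_l : List Int) (bitter_l : List Int) (length_inp : Int)
    (fuel : Nat) (length : Int) (sour : Int) (bitter : Int) (best : Int) : Int :=
  if length = length_inp then
    if bitter > 0 then min best (pvDiff sour bitter) else best
  else
    match fuel with
    | 0 => best  -- unreachable under Pre_find (Python's recursion never terminates here)
    | fuel' + 1 =>
      let best_with := findFuel sour_l bitter_l length_inp fuel' (length + 1)
        (sour * (PySem.List.pyGet? sour_l length).getD 0)
        (bitter + (PySem.List.pyGet? bitter_l length).getD 0) best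
      let best_without := findFuel sour_l bitter_l length_inp fuel' (length + 1) sour bitter best
      min best_with best_without

def find (length : Int) (sour : Int) (bitter : Int) (sour_l : List Int) (bitter_l : List Int) (length_inp : Int) (best : Int) : Int :=
  findFuel sour_l bitter_l length_inp ((length_inp - length).toNat) length sour bitter best

-- ===== PORT B =====
-- inner loop for one mask: bit (i - length) of mask decides inclusion of index i.
-- Indexing uses pyGet? (Python negative-wrap semantics); the .getD 0 default is never
-- reached under Pre_find (Python raises IndexError exactly there).  The '.toNat' on the
-- exponent is only reached outside Pre_find (Python's range(2 ** negative) raises).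
def pvMaskRun (sour_l : List Int) (bitter_l : List Int) (length : Int) (length_inp : Int)
    (sour : Int) (bitter : Int) (mask : Nat) : Int × Int :=
  (PySem.List.pyRange length length_inp 1).foldl
    (fun pt i =>
      if Nat.testBit mask (i - length).toNat then
        (pt.1 * (PySem.List.pyGet? sour_l i).getD 0,
         pt.2 + (PySem.List.pyGet? bitter_l i).getD 0)
      else pt)
    (sour, bitter)

def find_alt (length : Int) (sour : Int) (bitter : Int) (sour_l : List Int) (bitter_l : List Int) (length_inp : Int) (best : Int) : Int :=
  (List.range (2 ^ (length_inp - length).toNat)).foldl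
    (fun best mask =>
      let pt := pvMaskRun sour_l bitter_l length length_inp sour bitter mask
      if pt.2 > 0 then min best (|pt.1 - pt.2|) else best)
    best

-- ===== PRECONDITION & SPEC =====
-- Pre_find = exactly where Python A returns normally: length ≤ length_inp (else the
-- recursion never reaches the base case) and, when any index is visited, every index
-- length..length_inp-1 is in Python range (negative wrap allowed) for both lists
-- (outside this Python raises IndexError).
def Pre_find (length : Int) (sour : Int) (bitter : Int) (sour_l : List Int) (bitter_l : List Int) (length_inp : Int) (best : Int) : Prop :=
  length ≤ length_inp ∧
  (length < length_inp →
    -(sour_l.length : Int) ≤ length ∧ length_inp ≤ (sour_l.length : Int) ∧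
    -(bitter_l.length : Int) ≤ length ∧ length_inp ≤ (bitter_l.length : Int))
instance (length : Int) (sour : Int) (bitter : Int) (sour_l : List Int) (bitter_l : List Int) (length_inp : Int) (best : Int) : Decidable (Pre_find length sour bitter sour_l bitter_l length_inp best) := by unfold Pre_find; infer_instance
def pvWitness_find : Int × Int × Int × List Int × List Int × Int × Int := (0, 1, 0, [2, 3], [1, 1], 2, 100)

def Spec_find (length : Int) (sour : Int) (bitter : Int) (sour_l : List Int) (bitter_l : List Int) (length_inp : Int) (best : Int) (out : Int) : Prop := out = find_alt length sour bitter sour_l bitter_l length_inp best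
instance (length : Int) (sour : Int) (bitter : Int) (sour_l : List Int) (bitter_l : List Int) (length_inp : Int) (best : Int) (out : Int) : Decidable (Spec_find length sour bitter sour_l bitter_l length_inp best out) := by unfold Spec_find; infer_instance

-- ===== CLAIM (what is proved, stated in full; the proofs are below) =====
def Claim_equal_find : Prop := ∀ (length : Int) (sour : Int) (bitter : Int) (sour_l : List Int) (bitter_l : List Int) (length_inp : Int) (best : Int), Dom_find length sour bitter sour_l bitter_l length_inp best → Pre_find length sour bitter sour_l bitter_l length_inp best → Spec_find length sour bitter sour_l bitter_l length_inp best (find length sour bitter sour_l bitter_l length_inp best)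

-- ===== LEMMAS AND PROOFS =====

-- the final-scan folding function of B
def pvF (b : Int) (pt : Int × Int) : Int := if pt.2 > 0 then min b (|pt.1 - pt.2|) else b

-- the multiset of leaf states of A's recursion, in A's (include-first) order
def pvLeaves (sour_l : List Int) (bitter_l : List Int) : Nat → Int → Int → Int → List (Int × Int)
  | 0, _, s, b => [(s, b)]
  | n + 1, L, s, b =>
      pvLeaves sour_l bitter_l n (L + 1)
        (s * (PySem.List.pyGet? sour_l L).getD 0)
        (b + (PySem.List.pyGet? bitter_l L).getD 0) ++
      pvLeaves sour_l bitter_l n (L + 1) s b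

theorem pvF_comm (b : Int) (x y : Int × Int) : pvF (pvF b x) y = pvF (pvF b y) x := by
  unfold pvF
  split_ifs <;> simp [min_comm, min_left_comm]

theorem pvF_foldl_le (l : List (Int × Int)) (b : Int) : l.foldl pvF b ≤ b := by
  induction l generalizing b with
  | nil => simp
  | cons x l ih =>
      refine le_trans (ih (pvF b x)) ?_
      unfold pvF; split_ifs <;> simp

theorem pvF_foldl_min (l : List (Int × Int)) (x y : Int) :
    l.foldl pvF (min x y) = min x (l.foldl pvF y) := by
  induction l generalizing y with
  | nil => simp
  | cons p l ih =>
      have h : pvF (min x y) p = min x (pvF y p) := by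
        unfold pvF; split_ifs <;> simp [min_assoc]
      simp only [List.foldl_cons, h, ih]

theorem pvF_foldl_append (l1 l2 : List (Int × Int)) (b : Int) :
    (l1 ++ l2).foldl pvF b = min (l1.foldl pvF b) (l2.foldl pvF b) := by
  rw [List.foldl_append]
  have h : l1.foldl pvF b = min (l1.foldl pvF b) b :=
    (min_eq_left (pvF_foldl_le l1 b)).symm
  conv_lhs => rw [h]
  rw [pvF_foldl_min]

theorem pvF_foldl_perm {l1 l2 : List (Int × Int)} (h : l1.Perm l2) (b : Int) :
    l1.foldl pvF b = l2.foldl pvF b := by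
  exact List.Perm.foldl_eq (rcomm := ⟨pvF_comm⟩) h b

-- A's recursion computes the pvF-fold of its leaves
theorem findFuel_eq_leaves (sour_l bitter_l : List Int) (length_inp : Int) :
    ∀ (n : Nat) (L s b best : Int), L + (n : Int) = length_inp →
      findFuel sour_l bitter_l length_inp n L s b best =
        (pvLeaves sour_l bitter_l n L s b).foldl pvF best := by
  intro n
  induction n with
  | zero =>
      intro L s b best h
      have hL : L = length_inp := by omega
      simp [findFuel, hL, pvLeaves, pvF, pvDiff]
  | succ n ih =>
      intro L s b best h
      have hne : L ≠ length_inp := by omega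
      have h1 : (L + 1) + (n : Int) = length_inp := by push_cast at h ⊢; omega
      simp only [findFuel, hne, if_false, pvLeaves, pvF_foldl_append, ih _ _ _ _ h1]

-- pvMaskRun with an explicit base for the bit offset (pvMaskRun is the L = base case)
def pvRun (sour_l : List Int) (bitter_l : List Int) (mask : Nat) (L : Int) (hi : Int)
    (st : Int × Int) : Int × Int :=
  (PySem.List.pyRange L hi 1).foldl
    (fun pt i =>
      if Nat.testBit mask (i - L).toNat then
        (pt.1 * (PySem.List.pyGet? sour_l i).getD 0,
         pt.2 + (PySem.List.pyGet? bitter_l i).getD 0)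
      else pt)
    st

-- moving the bit-offset base one step right halves the mask
theorem pvRun_shift (sour_l bitter_l : List Int) (mask : Nat) (L hi : Int) (st : Int × Int) :
    (PySem.List.pyRange (L + 1) hi 1).foldl
      (fun pt i =>
        if Nat.testBit mask (i - L).toNat then
          (pt.1 * (PySem.List.pyGet? sour_l i).getD 0,
           pt.2 + (PySem.List.pyGet? bitter_l i).getD 0)
        else pt) st
    = pvRun sour_l bitter_l (mask / 2) (L + 1) hi st := by
  unfold pvRun
  refine PySem.List.foldl_congr_mem _ _ _ _ ?_
  intro acc i hi_mem
  have hL : L + 1 ≤ i := (PySem.List.mem_pyRange_one.mp hi_mem).1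
  have hidx : (i - L).toNat = (i - (L + 1)).toNat + 1 := by omega
  rw [hidx, Nat.testBit_add_one]

theorem pvRun_cons (sour_l bitter_l : List Int) (mask : Nat) (L hi : Int) (st : Int × Int)
    (h : L < hi) :
    pvRun sour_l bitter_l mask L hi st =
      pvRun sour_l bitter_l (mask / 2) (L + 1) hi
        (if Nat.testBit mask 0 then
          (st.1 * (PySem.List.pyGet? sour_l L).getD 0,
           st.2 + (PySem.List.pyGet? bitter_l L).getD 0)
         else st) := by
  unfold pvRun
  rw [PySem.List.pyRange_one_cons h]
  simp only [List.foldl_cons, Int.sub_self, Int.toNat_zero]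
  rw [pvRun_shift sour_l bitter_l mask L hi]
  rfl

-- even/odd split of the mask range
theorem pvRangeSplit : ∀ (m : Nat),
    (List.range (2 * m)).Perm
      ((List.range m).map (fun k => 2 * k + 1) ++ (List.range m).map (fun k => 2 * k)) := by
  intro m
  induction m with
  | zero => simp
  | succ m ih =>
      have h2 : 2 * (m + 1) = (2 * m + 1) + 1 := by omega
      rw [h2]
      simp only [List.range_succ, List.map_append, List.map_cons, List.map_nil]
      refine List.Perm.trans ((ih.append_right _).append_right _) ?_
      simp only [List.append_assoc]
      refine List.Perm.append_left _ ?_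
      refine List.Perm.trans ?_
        (List.perm_append_comm (l₁ := (List.range m).map (fun k => 2 * k) ++ [2 * m])
          (l₂ := [2 * m + 1]))
      simp

-- the mask enumeration produces exactly A's leaves (as a multiset)
theorem maskRuns_perm_leaves (sour_l bitter_l : List Int) :
    ∀ (n : Nat) (L s b : Int),
      (((List.range (2 ^ n)).map
          (fun mask => pvRun sour_l bitter_l mask L (L + (n : Int)) (s, b)))).Perm
        (pvLeaves sour_l bitter_l n L s b) := by
  intro n
  induction n with
  | zero =>
      intro L s b
      simp [pvRun, pvLeaves]
  | succ n ih =>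
      intro L s b
      have h2 : 2 ^ (n + 1) = 2 * 2 ^ n := by ring
      rw [h2]
      refine List.Perm.trans ((pvRangeSplit (2 ^ n)).map _) ?_
      rw [List.map_append, List.map_map, List.map_map]
      simp only [Function.comp_def]
      have hlt : L < L + ((n : Nat) + 1 : Nat) := by push_cast; omega
      have harith : L + (((n : Nat) + 1 : Nat) : Int) = (L + 1) + (n : Int) := by push_cast; omega
      have hodd : ∀ k ∈ List.range (2 ^ n),
          pvRun sour_l bitter_l (2 * k + 1) L (L + (((n : Nat) + 1 : Nat) : Int)) (s, b) =
            pvRun sour_l bitter_l k (L + 1) ((L + 1) + (n : Int))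
              (s * (PySem.List.pyGet? sour_l L).getD 0,
               b + (PySem.List.pyGet? bitter_l L).getD 0) := by
        intro k _
        rw [pvRun_cons sour_l bitter_l _ _ _ _ hlt]
        have hb : Nat.testBit (2 * k + 1) 0 = true := by
          rw [Nat.testBit_zero]; exact decide_eq_true (by omega)
        have hd : (2 * k + 1) / 2 = k := by omega
        rw [hb, hd, harith]
        simp
      have heven : ∀ k ∈ List.range (2 ^ n),
          pvRun sour_l bitter_l (2 * k) L (L + (((n : Nat) + 1 : Nat) : Int)) (s, b) =
            pvRun sour_l bitter_l k (L + 1) ((L + 1) + (n : Int)) (s, b) := by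
        intro k _
        rw [pvRun_cons sour_l bitter_l _ _ _ _ hlt]
        have hb : Nat.testBit (2 * k) 0 = false := by
          rw [Nat.testBit_zero]; exact decide_eq_false (by omega)
        have hd : (2 * k) / 2 = k := by omega
        rw [hb, hd, harith]
        simp
      rw [List.map_congr_left (fun k hk => hodd k hk), List.map_congr_left (fun k hk => heven k hk)]
      exact (ih (L + 1) _ _).append (ih (L + 1) s b)

-- ===== VERDICT (by name: the statement is the Claim_ definition above) =====
theorem find_spec : Claim_equal_find := by
  intro length sour bitter sour_l bitter_l length_inp best _ hpre
  unfold Spec_find find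
  obtain ⟨hle, -⟩ := hpre
  have hn : length + (((length_inp - length).toNat : Nat) : Int) = length_inp := by omega
  rw [findFuel_eq_leaves sour_l bitter_l length_inp _ _ _ _ _ hn]
  have hperm := maskRuns_perm_leaves sour_l bitter_l ((length_inp - length).toNat)
    length sour bitter
  rw [hn] at hperm
  have halt : find_alt length sour bitter sour_l bitter_l length_inp best =
      ((List.range (2 ^ (length_inp - length).toNat)).map
        (fun mask => pvRun sour_l bitter_l mask length length_inp (sour, bitter))).foldl
        pvF best := by
    rw [List.foldl_map]
    rfl
  rw [halt]
  exact (pvF_foldl_perm hperm best).symm
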